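-- pv_equiv track=rewrite | github.com/ahammadnafiz/Python-UIU | Brac_Func.py/function.py | function_name
-- ===== SOURCE A (Python) =====
-- def function_name(item_list, location = "Dhanmondi"):
--     item_price = {
--         'rice' : 105,
--         'potato' : 20,
--         'chicken' : 250,
--         'beef' : 510,
--         'oil' : 85
--     }
--
--     total_price = []
--     for item, price in item_price.items():
--         for i in item_list:
--             if i == item:
--                 total_price.append(price)
--     if location == "Dhanmondi":
--         price = 30 + sum(total_price)
--     else:
--         price = 70 + sum(total_price)
--
--     return price
-- ===== SOURCE B (Python) =====
-- def function_name(item_list, location = "Dhanmondi"):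
--     # count-then-multiply: one frequency table, then five multiplications
--     counts = {}
--     for i in item_list:
--         counts[i] = counts.get(i, 0) + 1
--     total = (105 * counts.get('rice', 0)
--              + 20 * counts.get('potato', 0)
--              + 250 * counts.get('chicken', 0)
--              + 510 * counts.get('beef', 0)
--              + 85 * counts.get('oil', 0))
--     return (30 if location == "Dhanmondi" else 70) + total
-- ===== Notes on version B (the rewrite author's own statement) =====
-- stated objective: alternative
-- what changed: Replaces A's nested key-by-key scans that append prices into an intermediate list with a count-then-multiply algorithm: one pass builds a frequency table of item_list, then the total is five price*count products.
import Mathlib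
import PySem

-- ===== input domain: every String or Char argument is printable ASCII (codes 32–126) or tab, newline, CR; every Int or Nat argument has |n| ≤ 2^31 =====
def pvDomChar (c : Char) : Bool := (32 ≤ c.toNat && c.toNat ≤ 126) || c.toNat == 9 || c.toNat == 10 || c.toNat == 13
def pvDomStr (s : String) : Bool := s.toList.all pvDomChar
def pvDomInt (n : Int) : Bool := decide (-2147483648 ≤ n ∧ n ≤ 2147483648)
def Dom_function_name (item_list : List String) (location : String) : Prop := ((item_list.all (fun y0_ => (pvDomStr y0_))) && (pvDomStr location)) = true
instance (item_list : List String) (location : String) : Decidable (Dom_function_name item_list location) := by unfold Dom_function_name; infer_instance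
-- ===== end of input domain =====

-- B replaces A's nested per-key scans and intermediate price list with a
-- count-then-multiply algorithm (one frequency pass, then price*count sums); same return value.

-- ===== PORT A =====
-- literal port: for item, price in item_price.items(): for i in item_list: if i == item: total_price.append(price)
def function_name (item_list : List String) (location : String) : Int :=
  let item_price : List (String × Int) :=
    [("rice", 105), ("potato", 20), ("chicken", 250), ("beef", 510), ("oil", 85)]
  let total_price : List Int :=
    item_price.foldl
      (fun acc kp =>
        item_list.foldl (fun a i => if i == kp.1 then a ++ [kp.2] else a) acc) []
  if location = "Dhanmondi" then 30 + total_price.sum else 70 + total_price.sum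

-- ===== PORT B =====
-- literal port of Source B: counts[i] = counts.get(i, 0) + 1 in one pass, then five price*count products
def function_name_alt (item_list : List String) (location : String) : Int :=
  let counts : PySem.Dict String Int :=
    item_list.foldl (fun d i => d.insert i (d.getD i 0 + 1)) PySem.Dict.empty
  let total : Int :=
    105 * counts.getD "rice" 0 + 20 * counts.getD "potato" 0
      + 250 * counts.getD "chicken" 0 + 510 * counts.getD "beef" 0
      + 85 * counts.getD "oil" 0
  (if location = "Dhanmondi" then (30 : Int) else 70) + total

-- ===== PRECONDITION & SPEC =====
def Spec_function_name (item_list : List String) (location : String) (out : Int) : Prop := out = function_name_alt item_list location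
instance (item_list : List String) (location : String) (out : Int) : Decidable (Spec_function_name item_list location out) := by unfold Spec_function_name; infer_instance

-- ===== CLAIM (what is proved, stated in full; the proofs are below) =====
def Claim_equal_function_name : Prop := ∀ (item_list : List String) (location : String), Dom_function_name item_list location → Spec_function_name item_list location (function_name item_list location)

-- ===== LEMMAS AND PROOFS =====

-- sum of the const-map over a filter = price * count
theorem pvSumFilter (L : List String) (k : String) (p : Int) :
    ((L.filter (fun i => i == k)).map (fun _ => p)).sum = p * (L.count k : Int) := by
  simp [List.count_eq_countP, List.countP_eq_length_filter, mul_comm]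

-- ===== VERDICT (by name: the statement is the Claim_ definition above) =====
theorem function_name_spec : Claim_equal_function_name := by
  intro L loc _
  show _ = _
  simp only [function_name, function_name_alt, List.foldl_cons, List.foldl_nil,
    PySem.List.foldl_append_if, List.nil_append, List.sum_append,
    PySem.Dict.getD_foldl_insert_add_one, PySem.Dict.getD_empty, pvSumFilter]
  split_ifs <;> ring
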